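-- pv_equiv track=rewrite | github.com/anastdr/LonCastAI | scripts/address_matching.py | get_last_address_part
-- ===== SOURCE A (Python) =====
-- from typing import Optional
--
-- def clean_text(value) -> Optional[str]:
--     if value is None:
--         return None
--
--     value = str(value).strip()
--     return value or None
--
-- def get_last_address_part(value) -> Optional[str]:
--     value = clean_text(value)
--     if not value:
--         return None
--
--     parts = [part.strip() for part in value.split(",") if part.strip()]
--     if not parts:
--         return None
--
--     return parts[-1]
-- ===== SOURCE B (Python) =====
-- def get_last_address_part(value):
--     if value is None:
--         return None
--     seg = []
--     for ch in reversed(str(value).strip()):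
--         if ch == ",":
--             part = "".join(reversed(seg)).strip()
--             if part:
--                 return part
--             seg = []
--         else:
--             seg.append(ch)
--     part = "".join(reversed(seg)).strip()
--     return part or None
-- ===== Notes on version B (the rewrite author's own statement) =====
-- stated objective: alternative
-- what changed: Replaces splitting the string into a parts list plus filter-and-take-last by a single right-to-left character scan that collects the current segment and returns the first non-blank trimmed segment it meets, with early exit.
import Mathlib
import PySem

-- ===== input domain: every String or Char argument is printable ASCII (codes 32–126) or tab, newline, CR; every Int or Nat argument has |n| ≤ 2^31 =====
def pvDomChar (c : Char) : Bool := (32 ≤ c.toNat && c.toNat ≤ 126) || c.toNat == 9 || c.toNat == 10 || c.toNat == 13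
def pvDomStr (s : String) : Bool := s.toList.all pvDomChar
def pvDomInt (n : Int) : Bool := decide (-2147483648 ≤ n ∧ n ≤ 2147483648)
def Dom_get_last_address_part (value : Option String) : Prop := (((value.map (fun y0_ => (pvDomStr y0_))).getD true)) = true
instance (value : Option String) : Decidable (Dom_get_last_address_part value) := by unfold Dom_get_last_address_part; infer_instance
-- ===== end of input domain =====

-- B replaces split-into-a-list + filter + last by a single right-to-left scan with early exit (alternative decomposition, same cost).

-- ===== PORT A =====
def clean_text (value : Option String) : Option String :=
  match value with
  | none => none
  | some s =>
    let v := PySem.Str.strip s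
    if v = "" then none else some v

def get_last_address_part (value : Option String) : Option String :=
  match clean_text value with
  | none => none
  | some v =>
    let parts := (((PySem.Str.split? v ",").getD []).filter
        (fun part => !(PySem.Str.strip part == ""))).map PySem.Str.strip
    if parts = [] then none
    else PySem.List.pyGet? parts (-1)

-- ===== PORT B =====
-- the loop `for ch in reversed(...)` with accumulator seg (seg holds the chars right-to-left,
-- i.e. cons'ing here = Python's append + final reversed join)
def pvLastSeg : List Char → List Char → Option String
  | [], seg =>
    let p := PySem.Chars.strip seg
    if p = [] then none else some (String.ofList p)
  | c :: rest, seg =>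
    if c = ',' then
      let p := PySem.Chars.strip seg
      if p = [] then pvLastSeg rest [] else some (String.ofList p)
    else pvLastSeg rest (c :: seg)

def get_last_address_part_alt (value : Option String) : Option String :=
  match value with
  | none => none
  | some s => pvLastSeg (PySem.Str.strip s).toList.reverse []

-- ===== PRECONDITION & SPEC =====
def Spec_get_last_address_part (value : Option String) (out : Option String) : Prop := out = get_last_address_part_alt value
instance (value : Option String) (out : Option String) : Decidable (Spec_get_last_address_part value out) := by unfold Spec_get_last_address_part; infer_instance

-- ===== CLAIM (what is proved, stated in full; the proofs are below) =====
def Claim_equal_get_last_address_part : Prop := ∀ (value : Option String), Dom_get_last_address_part value → Spec_get_last_address_part value (get_last_address_part value)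

-- ===== LEMMAS AND PROOFS =====

-- reference split on ',' (what splitOn computes for this one-char separator)
def pvSplit : List Char → List Char → List (List Char)
  | [], cur => [cur.reverse]
  | c :: rest, cur =>
    if c = ',' then cur.reverse :: pvSplit rest [] else pvSplit rest (c :: cur)

theorem pvSplit_no_comma (l cur : List Char) (h : ',' ∉ l) :
    pvSplit l cur = [cur.reverse ++ l] := by
  induction l generalizing cur with
  | nil => simp [pvSplit]
  | cons c rest ih =>
    simp only [List.mem_cons, not_or] at h
    simp [pvSplit, Ne.symm h.1, ih _ h.2]

theorem pvSplit_append_comma (x t cur : List Char) (h : ',' ∉ t) :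
    pvSplit (x ++ ',' :: t) cur = pvSplit x cur ++ [t] := by
  induction x generalizing cur with
  | nil => simp [pvSplit, pvSplit_no_comma t [] h]
  | cons c rest ih =>
    by_cases hc : c = ','
    · subst hc; simp [pvSplit, ih]
    · simp [pvSplit, hc, ih]

theorem splitOn_go_comma (l : List Char) :
    ∀ (fuel : Nat), l.length ≤ fuel → ∀ (cur : List Char) (acc : List (List Char)),
    PySem.Chars.splitOn.go [','] fuel l cur acc = acc.reverse ++ pvSplit l cur := by
  induction l with
  | nil =>
    intro fuel _ cur acc
    cases fuel <;> simp [PySem.Chars.splitOn.go, pvSplit]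
  | cons c rest ih =>
    intro fuel hf cur acc
    cases fuel with
    | zero => simp at hf
    | succ fuel' =>
      by_cases hc : c = ','
      · subst hc
        simp only [PySem.Chars.splitOn.go, List.isPrefixOf, pvSplit]
        simp [ih fuel' (by simpa using hf) [] (cur.reverse :: acc)]
      · have hpre : [','].isPrefixOf (c :: rest) = false := by
          simp [List.isPrefixOf, Ne.symm hc]
        simp only [PySem.Chars.splitOn.go, hpre, Bool.false_eq_true, if_false, pvSplit,
          hc, if_false]
        exact ih fuel' (by simpa using Nat.le_of_succ_le_succ hf) (c :: cur) acc

theorem splitOn_comma (l : List Char) :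
    PySem.Chars.splitOn l [','] = pvSplit l [] := by
  simpa using splitOn_go_comma l (l.length + 1) (by omega) [] []

-- A's value, phrased over chars
def pvARes (l : List Char) : Option String :=
  ((((pvSplit l []).map PySem.Chars.strip).filter
      (fun q => !(q == ([] : List Char)))).getLast?).map String.ofList

theorem pvLastSeg_eq (r : List Char) :
    ∀ (acc : List Char), ',' ∉ acc → pvLastSeg r acc = pvARes (r.reverse ++ acc) := by
  induction r with
  | nil =>
    intro acc hacc
    simp only [pvLastSeg, pvARes, List.reverse_nil, List.nil_append,
      pvSplit_no_comma acc [] hacc]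
    by_cases h : PySem.Chars.strip acc = [] <;> simp [h]
  | cons c rest ih =>
    intro acc hacc
    by_cases hc : c = ','
    · subst hc
      have hsplit : pvSplit (rest.reverse ++ ',' :: acc) [] =
          pvSplit rest.reverse [] ++ [acc] := pvSplit_append_comma _ _ _ hacc
      simp only [pvLastSeg, pvARes, List.reverse_cons, List.append_assoc,
        List.singleton_append, hsplit]
      by_cases h : PySem.Chars.strip acc = []
      · simp only [h, if_true]
        rw [ih [] (by simp)]
        simp [pvARes, h]
      · simp [h]
    · simp only [pvLastSeg, hc, if_false, List.reverse_cons, List.append_assoc,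
        List.singleton_append]
      exact ih (c :: acc) (by simp [Ne.symm hc, hacc])

theorem pyGet_neg_one_getLast {α : Type} (xs : List α) (h : xs ≠ []) :
    PySem.List.pyGet? xs (-1) = xs.getLast? := by
  have hn : 0 < xs.length := List.length_pos_iff.mpr h
  simp only [PySem.List.pyGet?, PySem.List.pyIdx?]
  rw [if_neg (by omega), if_pos (by omega)]
  simp [List.getLast?_eq_getElem?]

theorem parts_bridge (ps : List (List Char)) :
    (((ps.map String.ofList).filter
        (fun part => !(PySem.Str.strip part == ""))).map PySem.Str.strip)
      = (((ps.map PySem.Chars.strip).filter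
          (fun q => !(q == ([] : List Char)))).map String.ofList) := by
  induction ps with
  | nil => rfl
  | cons p rest ih =>
    have hs : PySem.Str.strip (String.ofList p) = String.ofList (PySem.Chars.strip p) := by
      simp [PySem.Str.strip]
    by_cases h : PySem.Chars.strip p = []
    · simp [hs, h, ih]
    · have hne : ¬ String.ofList (PySem.Chars.strip p) = "" := fun hq =>
        h (by simpa using congrArg String.toList hq)
      simp [hs, h, hne, ih]

theorem A_eq_pvARes (v : String) :
    (let parts := (((PySem.Str.split? v ",").getD []).filter
        (fun part => !(PySem.Str.strip part == ""))).map PySem.Str.strip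
     if parts = [] then none else PySem.List.pyGet? parts (-1)) = pvARes v.toList := by
  have hsplit : (PySem.Str.split? v ",").getD [] =
      (PySem.Chars.splitOn v.toList [',']).map String.ofList := by
    simp [PySem.Str.split?, PySem.Chars.split?]
  simp only [hsplit, parts_bridge, splitOn_comma]
  by_cases hL : ((pvSplit v.toList []).map PySem.Chars.strip).filter
      (fun q => !(q == ([] : List Char))) = []
  · rw [hL]
    unfold pvARes
    rw [hL]
    rfl
  · rw [if_neg (by simpa using hL), pyGet_neg_one_getLast _ (by simpa using hL)]
    simp [pvARes]

-- ===== VERDICT (by name: the statement is the Claim_ definition above) =====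
theorem get_last_address_part_spec : Claim_equal_get_last_address_part := by
  intro value _
  unfold Spec_get_last_address_part get_last_address_part get_last_address_part_alt clean_text
  cases value with
  | none => rfl
  | some s =>
    simp only
    by_cases h : PySem.Str.strip s = ""
    · have ht : (PySem.Str.strip s).toList = [] := by simp [h]
      rw [ht]
      simp [h, pvLastSeg, PySem.Chars.strip, PySem.Chars.lstrip, PySem.Chars.rstrip]
    · rw [if_neg h]
      simp only
      rw [pvLastSeg_eq _ [] (by simp), List.append_nil, List.reverse_reverse]
      exact A_eq_pvARes _
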